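-- pv_equiv track=rewrite | github.com/Yahara-Software/rob-nickel-adventurer-journey-be | path_distance.py | path_distance
-- ===== SOURCE A (Python) =====
-- def path_distance(path: str) -> [int, int]:
--     current_number = 0
--     position = [0, 0]
--     for char in path:
--         if char in ['F', 'B', 'R', 'L']:
--             if char == 'F': #Forward
--                 position[1] += current_number
--             elif char == 'B':#Backward
--                 position[1] -= current_number
--             elif char == 'R':#Right
--                 position[0] += current_number
--             elif char == 'L':#Left
--                 position[0] -= current_number
--             current_number = 0
--         elif char.isdigit():
--             current_number = current_number * 10 + int(char)
--         else:
--             raise ValueError(f"Invalid character: {char}")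
--     return position
-- ===== SOURCE B (Python) =====
-- import re
--
-- _DIRS = {'F': (1, 1), 'B': (1, -1), 'R': (0, 1), 'L': (0, -1)}
--
-- def path_distance(path: str) -> [int, int]:
--     position = [0, 0]
--     current_number = 0
--     for m in re.finditer(r'\d+|.', path, re.DOTALL):
--         token = m.group()
--         if token.isdigit():
--             current_number = int(token)
--         elif token in _DIRS:
--             axis, sign = _DIRS[token]
--             position[axis] += sign * current_number
--             current_number = 0
--         else:
--             raise ValueError(f"Invalid character: {token}")
--     return position
-- ===== Notes on version B (the rewrite author's own statement) =====
-- stated objective: idiomatic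
-- what changed: B tokenizes the string into maximal digit-runs and single characters (re.finditer) and folds over tokens converting each whole number run with int() and applying a direction->(axis,sign) table, instead of A's per-character state machine that accumulates digits one by one through an if/elif chain.
import Mathlib
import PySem

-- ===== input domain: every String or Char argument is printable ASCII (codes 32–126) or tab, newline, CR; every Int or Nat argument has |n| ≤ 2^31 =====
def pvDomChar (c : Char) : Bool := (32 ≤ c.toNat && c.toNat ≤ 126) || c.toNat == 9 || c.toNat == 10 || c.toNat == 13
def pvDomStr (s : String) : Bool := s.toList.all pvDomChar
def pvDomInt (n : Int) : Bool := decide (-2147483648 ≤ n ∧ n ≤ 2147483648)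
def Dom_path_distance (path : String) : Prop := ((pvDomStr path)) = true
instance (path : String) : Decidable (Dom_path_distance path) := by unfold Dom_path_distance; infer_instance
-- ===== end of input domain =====

-- B tokenizes into digit-runs and letters and folds over tokens with a direction table,
-- instead of A's per-character digit-accumulating state machine (idiomatic decomposition; same cost).


-- ===== PORT A =====
-- state = (current_number, position[0], position[1]); the 'raise ValueError' branch is
-- excluded by Pre_path_distance, there the fold leaves the state unchanged.
def pdAStep (s : Int × Int × Int) (c : Char) : Int × Int × Int :=
  if c = 'F' ∨ c = 'B' ∨ c = 'R' ∨ c = 'L' then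
    (0,
     if c = 'R' then s.2.1 + s.1 else if c = 'L' then s.2.1 - s.1 else s.2.1,
     if c = 'F' then s.2.2 + s.1 else if c = 'B' then s.2.2 - s.1 else s.2.2)
  else if c.isDigit then
    (s.1 * 10 + ((c.toNat : Int) - 48), s.2.1, s.2.2)  -- int(char): exact for '0'..'9'
  else
    s  -- raise ValueError("Invalid character: …"): outside Pre_path_distance

def path_distance (path : String) : List Int :=
  let st := path.toList.foldl pdAStep (0, 0, 0)
  [st.2.1, st.2.2]

-- ===== PORT B =====
-- tokens of re.finditer(r'\d+|.'): a maximal digit run, or a single other character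
inductive PdTok where
  | num : List Char → PdTok
  | chr : Char → PdTok
deriving DecidableEq, Repr

def pdTokenize : List Char → List PdTok
  | [] => []
  | c :: cs =>
    if c.isDigit then
      PdTok.num (c :: cs.takeWhile Char.isDigit) :: pdTokenize (cs.dropWhile Char.isDigit)
    else
      PdTok.chr c :: pdTokenize cs
termination_by l => l.length
decreasing_by
  · simpa using Nat.lt_succ_of_le (List.length_dropWhile_le _ _)
  · simp

-- int(token) for a digit-run token
def pdIntOfDigits (ds : List Char) : Int :=
  ds.foldl (fun n d => n * 10 + ((d.toNat : Int) - 48)) 0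

-- the _DIRS table applied; invalid tokens (raise) are outside Pre_path_distance
def pdBStep (s : Int × Int × Int) (t : PdTok) : Int × Int × Int :=
  match t with
  | PdTok.num ds => (pdIntOfDigits ds, s.2.1, s.2.2)
  | PdTok.chr c =>
    if c = 'F' then (0, s.2.1, s.2.2 + s.1)
    else if c = 'B' then (0, s.2.1, s.2.2 - s.1)
    else if c = 'R' then (0, s.2.1 + s.1, s.2.2)
    else if c = 'L' then (0, s.2.1 - s.1, s.2.2)
    else s  -- raise ValueError: outside Pre_path_distance

def path_distance_alt (path : String) : List Int :=
  let st := (pdTokenize path.toList).foldl pdBStep (0, 0, 0)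
  [st.2.1, st.2.2]

-- ===== PRECONDITION & SPEC =====
-- exactly the inputs A returns on: every character is a direction letter or a digit
-- (on any other character A raises ValueError)
def Pre_path_distance (path : String) : Prop :=
  path.toList.all (fun c => c = 'F' || c = 'B' || c = 'R' || c = 'L' || c.isDigit) = true
instance (path : String) : Decidable (Pre_path_distance path) := by
  unfold Pre_path_distance; infer_instance

def pvWitness_path_distance : String := "2F"

def Spec_path_distance (path : String) (out : List Int) : Prop := out = path_distance_alt path
instance (path : String) (out : List Int) : Decidable (Spec_path_distance path out) := by
  unfold Spec_path_distance; infer_instance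

-- ===== CLAIM (what is proved, stated in full; the proofs are below) =====
def Claim_equal_path_distance : Prop :=
  ∀ (path : String), Dom_path_distance path → Pre_path_distance path →
    Spec_path_distance path (path_distance path)

-- ===== LEMMAS AND PROOFS =====

-- a digit character is not a direction letter
theorem pd_digit_not_dir {c : Char} (h : c.isDigit = true) :
    ¬ (c = 'F' ∨ c = 'B' ∨ c = 'R' ∨ c = 'L') := by
  rintro (rfl | rfl | rfl | rfl) <;> simp_all

-- A's fold over a run of digits only accumulates into current_number
theorem pd_fold_digits (ds : List Char) (hds : ∀ c ∈ ds, c.isDigit = true) :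
    ∀ (cur x y : Int),
      ds.foldl pdAStep (cur, x, y) =
        (ds.foldl (fun n d => n * 10 + ((d.toNat : Int) - 48)) cur, x, y) := by
  induction ds with
  | nil => intro cur x y; rfl
  | cons d ds ih =>
    intro cur x y
    have hd : d.isDigit = true := hds d (List.mem_cons_self ..)
    have hrest : ∀ c ∈ ds, c.isDigit = true := fun c hc => hds c (List.mem_cons_of_mem _ hc)
    simp only [List.foldl_cons]
    rw [show pdAStep (cur, x, y) d = (cur * 10 + ((d.toNat : Int) - 48), x, y) by
          simp [pdAStep, pd_digit_not_dir hd, hd]]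
    exact ih hrest _ _ _

-- main invariant: A's char fold equals B's token fold, provided the state's
-- current_number is 0 whenever the remaining input starts with a digit
theorem pd_main (n : Nat) :
    ∀ (l : List Char), l.length ≤ n →
      (∀ c ∈ l, c = 'F' ∨ c = 'B' ∨ c = 'R' ∨ c = 'L' ∨ c.isDigit = true) →
      ∀ (cur x y : Int),
        (cur = 0 ∨ ∀ c, l.head? = some c → c.isDigit = false) →
        l.foldl pdAStep (cur, x, y) = (pdTokenize l).foldl pdBStep (cur, x, y) := by
  induction n with
  | zero =>
    intro l hl _ cur x y _
    have hlen : l = [] := by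
      cases l with
      | nil => rfl
      | cons a as => simp at hl
    subst hlen; simp [pdTokenize]
  | succ n ih =>
    intro l hl hval cur x y hcur
    match l with
    | [] => simp [pdTokenize]
    | c :: cs =>
      by_cases hd : c.isDigit = true
      · -- digit: tokenize groups the maximal run; cur must be 0
        have hcur0 : cur = 0 := by
          rcases hcur with h | h
          · exact h
          · have := h c rfl; simp_all
        subst hcur0
        have hsplit : c :: cs = (c :: cs.takeWhile Char.isDigit) ++ cs.dropWhile Char.isDigit := by
          simp [List.takeWhile_append_dropWhile]
        have hrun : ∀ d ∈ (c :: cs.takeWhile Char.isDigit), d.isDigit = true := by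
          intro d hdm
          rcases List.mem_cons.mp hdm with rfl | hdm
          · exact hd
          · exact List.mem_takeWhile_imp hdm
        rw [pdTokenize, if_pos hd]
        conv_rhs => rw [List.foldl_cons]
        rw [show pdBStep (0, x, y) (PdTok.num (c :: cs.takeWhile Char.isDigit)) =
              (pdIntOfDigits (c :: cs.takeWhile Char.isDigit), x, y) from rfl]
        conv_lhs => rw [hsplit]
        rw [List.foldl_append, pd_fold_digits _ hrun]
        have hlen' : (cs.dropWhile Char.isDigit).length ≤ n := by
          have := List.length_dropWhile_le Char.isDigit cs
          simp at hl; omega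
        have hval' : ∀ a ∈ cs.dropWhile Char.isDigit,
            a = 'F' ∨ a = 'B' ∨ a = 'R' ∨ a = 'L' ∨ a.isDigit = true := by
          intro a ha
          exact hval a (List.mem_cons_of_mem _ ((List.dropWhile_sublist _).subset ha))
        have hhead : ∀ a, (cs.dropWhile Char.isDigit).head? = some a → a.isDigit = false := by
          intro a ha
          have := List.head?_dropWhile_not (p := Char.isDigit) (l := cs)
          rcases h : (cs.dropWhile Char.isDigit).head? with _ | b
          · simp [h] at ha
          · rw [h] at ha this; cases ha
            simpa using this
        exact ih _ hlen' hval' _ x y (Or.inr hhead)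
      · -- non-digit: by Pre_ a direction letter; both sides do the same update and reset cur
        have hv := hval c (List.mem_cons_self ..)
        rw [pdTokenize, if_neg (by simp [hd]), List.foldl_cons, List.foldl_cons]
        have hlen' : cs.length ≤ n := by simp at hl; omega
        have hval' : ∀ a ∈ cs, a = 'F' ∨ a = 'B' ∨ a = 'R' ∨ a = 'L' ∨ a.isDigit = true :=
          fun a ha => hval a (List.mem_cons_of_mem _ ha)
        have hstep : pdAStep (cur, x, y) c = pdBStep (cur, x, y) (PdTok.chr c) := by
          rcases hv with rfl | rfl | rfl | rfl | hdd
          · simp [pdAStep, pdBStep]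
          · simp [pdAStep, pdBStep]
          · simp [pdAStep, pdBStep]
          · simp [pdAStep, pdBStep]
          · exact absurd hdd (by simp [hd])
        rw [hstep]
        have hfst : (pdBStep (cur, x, y) (PdTok.chr c)).1 = 0 := by
          rcases hv with rfl | rfl | rfl | rfl | hdd
          · rfl
          · rfl
          · rfl
          · rfl
          · exact absurd hdd (by simp [hd])
        exact ih cs hlen' hval' _ _ _ (Or.inl hfst)

-- ===== VERDICT (by name: the statement is the Claim_ definition above) =====
theorem path_distance_spec : Claim_equal_path_distance := by
  intro path _ hpre
  have hpre' : ∀ c ∈ path.toList, c = 'F' ∨ c = 'B' ∨ c = 'R' ∨ c = 'L' ∨ c.isDigit = true := by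
    intro c hc
    have := List.all_eq_true.mp hpre c hc
    have h2 := by simpa using this
    tauto
  unfold Spec_path_distance path_distance path_distance_alt
  rw [pd_main path.toList.length path.toList le_rfl hpre' 0 0 0 (Or.inl rfl)]
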